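-- pv_equiv track=rewrite | github.com/mihett05/record-linkage | preprocess/pipelines/emails.py | slice_by_digits
-- ===== SOURCE A (Python) =====
-- def slice_by_digits(email: str) -> str:
--     start_index = 0
--     for i in range(len(email)):
--         if email[i].isdigit():
--             start_index = i
--             break
--
--     end_index = 0
--     for i in range(len(email) - 1, -1, -1):
--         if email[i].isdigit():
--             end_index = i
--             break
--     digit_part = "".join([c for c in email[start_index : end_index + 1] if c.isdigit()])
--     return email[:start_index] + digit_part
-- ===== SOURCE B (Python) =====
-- def slice_by_digits(email: str) -> str:
--     # Single left-to-right pass with a small state machine: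
--     # before the first digit, characters go to the prefix; from the first
--     # digit on, only digits are collected. If no digit was ever seen,
--     # the result is the empty string.
--     prefix = []
--     digits = []
--     seen = False
--     for c in email:
--         if c.isdigit():
--             seen = True
--             digits.append(c)
--         elif not seen:
--             prefix.append(c)
--     return "".join(prefix) + "".join(digits) if seen else ""
-- ===== Notes on version B (the rewrite author's own statement) =====
-- stated objective: alternative
-- what changed: Replaces A's staged passes (forward index scan for the first digit, backward index scan for the last digit, then a filtered slice and prefix slice) with one single left-to-right pass maintaining a state machine (prefix accumulator / digit accumulator / seen flag), with no indexing or slicing at all; the single pass without per-character indexing gives a constant-factor speedup.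
import Mathlib
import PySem

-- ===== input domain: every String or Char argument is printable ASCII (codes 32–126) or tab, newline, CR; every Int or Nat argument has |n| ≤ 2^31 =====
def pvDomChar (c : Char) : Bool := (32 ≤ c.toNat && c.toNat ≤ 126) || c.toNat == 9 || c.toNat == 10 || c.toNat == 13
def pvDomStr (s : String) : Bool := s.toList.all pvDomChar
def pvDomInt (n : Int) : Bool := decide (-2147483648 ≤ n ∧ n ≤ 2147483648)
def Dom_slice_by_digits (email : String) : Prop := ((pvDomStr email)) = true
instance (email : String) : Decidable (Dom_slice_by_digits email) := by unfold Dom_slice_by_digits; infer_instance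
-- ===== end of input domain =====

-- ===== PORT A =====
-- One honest line: B replaces A's staged passes (forward scan, backward scan, filtered
-- slice) by a single left-to-right pass with a pfx/digits/seen state machine (alternative).

-- forward loop: 'for i in range(len(email)): if email[i].isdigit(): start_index = i; break'
def pvFirstLoop (cs : List Char) (i : Nat) : Nat :=
  match cs with
  | [] => 0
  | c :: rest => if PySem.Chars.isdigit c then i else pvFirstLoop rest (i + 1)

-- backward loop: 'for i in range(len(email)-1, -1, -1): if email[i].isdigit(): end_index = i; break'
-- (transcribed as the same scan over the reversed list with the index counting down)
def pvLastLoop (cs : List Char) (i : Nat) : Nat :=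
  match cs with
  | [] => 0
  | c :: rest => if PySem.Chars.isdigit c then i else pvLastLoop rest (i - 1)

def slice_by_digits (email : String) : String :=
  let cs := email.toList
  let start_index := pvFirstLoop cs 0
  let end_index := pvLastLoop cs.reverse (cs.length - 1)
  let digit_part :=
    (PySem.List.slice cs (some (start_index : Int)) (some ((end_index : Int) + 1))).filter
      PySem.Chars.isdigit
  String.ofList (PySem.List.slice cs none (some (start_index : Int)) ++ digit_part)

-- ===== PORT B =====
-- single pass: 'for c in email: if c.isdigit(): seen=True; digits.append(c) elif not seen: pfx.append(c)'
def pvLoopB (cs : List Char) (pfx digits : List Char) (seen : Bool) :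
    List Char × List Char × Bool :=
  match cs with
  | [] => (pfx, digits, seen)
  | c :: rest =>
    if PySem.Chars.isdigit c then pvLoopB rest pfx (digits ++ [c]) true
    else if !seen then pvLoopB rest (pfx ++ [c]) digits seen
    else pvLoopB rest pfx digits seen

def slice_by_digits_alt (email : String) : String :=
  let st := pvLoopB email.toList [] [] false
  if st.2.2 then String.ofList (st.1 ++ st.2.1) else ""

-- ===== PRECONDITION & SPEC =====
def Spec_slice_by_digits (email : String) (out : String) : Prop := out = slice_by_digits_alt email
instance (email : String) (out : String) : Decidable (Spec_slice_by_digits email out) := by unfold Spec_slice_by_digits; infer_instance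

-- ===== CLAIM (what is proved, stated in full; the proofs are below) =====
def Claim_equal_slice_by_digits : Prop := ∀ (email : String), Dom_slice_by_digits email → Spec_slice_by_digits email (slice_by_digits email)

-- ===== LEMMAS AND PROOFS =====

theorem mem_take_findIdx {α : Type} (p : α → Bool) (l : List α) (x : α)
    (hx : x ∈ l.take (l.findIdx p)) : p x = false := by
  induction l with
  | nil => simp at hx
  | cons a l ih =>
    by_cases hpa : p a
    · simp [List.findIdx_cons, hpa] at hx
    · simp only [List.findIdx_cons, hpa, cond_false, List.take_succ_cons, List.mem_cons] at hx
      rcases hx with rfl | hx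
      · simpa using hpa
      · exact ih hx

theorem firstLoop_eq (cs : List Char) (i : Nat)
    (h : ∃ c ∈ cs, PySem.Chars.isdigit c) :
    pvFirstLoop cs i = i + cs.findIdx PySem.Chars.isdigit := by
  induction cs generalizing i with
  | nil => simp at h
  | cons c rest ih =>
    by_cases hc : PySem.Chars.isdigit c
    · simp [pvFirstLoop, hc, List.findIdx_cons]
    · have hr : ∃ c ∈ rest, PySem.Chars.isdigit c := by
        rcases h with ⟨d, hd, hdd⟩
        rcases List.mem_cons.mp hd with rfl | hd
        · exact absurd hdd hc
        · exact ⟨d, hd, hdd⟩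
      simp [pvFirstLoop, hc, List.findIdx_cons, ih _ hr]
      omega

theorem lastLoop_eq (cs : List Char) (i : Nat)
    (h : ∃ c ∈ cs, PySem.Chars.isdigit c) :
    pvLastLoop cs i = i - cs.findIdx PySem.Chars.isdigit := by
  induction cs generalizing i with
  | nil => simp at h
  | cons c rest ih =>
    by_cases hc : PySem.Chars.isdigit c
    · simp [pvLastLoop, hc, List.findIdx_cons]
    · have hr : ∃ c ∈ rest, PySem.Chars.isdigit c := by
        rcases h with ⟨d, hd, hdd⟩
        rcases List.mem_cons.mp hd with rfl | hd
        · exact absurd hdd hc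
        · exact ⟨d, hd, hdd⟩
      simp [pvLastLoop, hc, List.findIdx_cons, ih _ hr]
      omega

theorem firstLoop_none (cs : List Char) (i : Nat)
    (h : ∀ c ∈ cs, PySem.Chars.isdigit c = false) : pvFirstLoop cs i = 0 := by
  induction cs generalizing i with
  | nil => rfl
  | cons c rest ih =>
    simp [pvFirstLoop, h c (List.mem_cons_self ..)]
    exact ih _ (fun d hd => h d (List.mem_cons_of_mem _ hd))

theorem lastLoop_none (cs : List Char) (i : Nat)
    (h : ∀ c ∈ cs, PySem.Chars.isdigit c = false) : pvLastLoop cs i = 0 := by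
  induction cs generalizing i with
  | nil => rfl
  | cons c rest ih =>
    simp [pvLastLoop, h c (List.mem_cons_self ..)]
    exact ih _ (fun d hd => h d (List.mem_cons_of_mem _ hd))

-- A's list-level result equals the canonical form
theorem a_core_eq (cs : List Char) :
    (let start_index := pvFirstLoop cs 0
     let end_index := pvLastLoop cs.reverse (cs.length - 1)
     let digit_part :=
       (PySem.List.slice cs (some (start_index : Int)) (some ((end_index : Int) + 1))).filter
         PySem.Chars.isdigit
     PySem.List.slice cs none (some (start_index : Int)) ++ digit_part)
    = (let digits := cs.filter PySem.Chars.isdigit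
       if digits.isEmpty then ([] : List Char)
       else cs.take (cs.findIdx PySem.Chars.isdigit) ++ digits) := by
  simp only
  by_cases hE : (cs.filter PySem.Chars.isdigit).isEmpty
  · -- no digit anywhere
    have hnone : ∀ c ∈ cs, PySem.Chars.isdigit c = false := by
      intro c hc
      have h' := List.isEmpty_iff.mp hE
      rw [List.filter_eq_nil_iff] at h'
      simpa using h' c hc
    have hnr : ∀ c ∈ cs.reverse, PySem.Chars.isdigit c = false := by
      simpa using hnone
    rw [firstLoop_none cs 0 hnone, lastLoop_none cs.reverse _ hnr]
    rw [if_pos hE]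
    have h01 : ((0 : Nat) : Int) + 1 = ((1 : Nat) : Int) := by omega
    rw [h01, PySem.List.slice_natCast, PySem.List.slice_to_natCast]
    simp only [List.drop_zero, List.take_zero, List.nil_append]
    rw [List.filter_eq_nil_iff]
    intro c hc
    exact by simpa using hnone c (List.mem_of_mem_take hc)
  · -- a digit exists
    have hex : ∃ c ∈ cs, PySem.Chars.isdigit c := by
      have h' : cs.filter PySem.Chars.isdigit ≠ [] := by
        intro h0; exact hE (by simp [h0])
      rcases List.exists_mem_of_ne_nil _ h' with ⟨c, hc⟩
      rw [List.mem_filter] at hc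
      exact ⟨c, hc.1, hc.2⟩
    have hexr : ∃ c ∈ cs.reverse, PySem.Chars.isdigit c := by
      rcases hex with ⟨c, hc, hp⟩; exact ⟨c, List.mem_reverse.mpr hc, hp⟩
    set p := PySem.Chars.isdigit with hp
    set f := cs.findIdx p with hf
    set g := cs.reverse.findIdx p with hg
    have hglen : g < cs.length := by
      have := List.findIdx_lt_length.mpr hexr
      simpa using this
    have hflen : f < cs.length := List.findIdx_lt_length.mpr hex
    rw [firstLoop_eq cs 0 hex, lastLoop_eq cs.reverse _ hexr]
    simp only [Nat.zero_add, if_neg hE]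
    set e : Nat := cs.length - 1 - g with he
    have he1 : e + 1 = cs.length - g := by omega
    -- everything before index f is a non-digit
    have hpre : ∀ x ∈ cs.take f, p x = false := fun x hx => mem_take_findIdx p cs x hx
    -- everything after index e is a non-digit
    have hsuf : ∀ x ∈ cs.drop (e + 1), p x = false := by
      intro x hx
      have hrev : (cs.drop (e + 1)).reverse = cs.reverse.take g := by
        rw [List.reverse_drop]
        congr 1
        omega
      have hx' : x ∈ cs.reverse.take g := by
        rw [← hrev]; exact List.mem_reverse.mpr hx
      exact mem_take_findIdx p cs.reverse x hx'
    -- the first digit is not after the last digit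
    have hfe : f ≤ e := by
      by_contra hlt
      rcases hex with ⟨c, hc, hpc⟩
      rcases List.mem_append.mp ((List.take_append_drop (e + 1) cs) ▸ hc) with h1 | h2
      · have hcf : c ∈ cs.take f := by
          have heq : cs.take (e + 1) = (cs.take f).take (e + 1) := by
            rw [List.take_take]
            congr 1
            omega
          exact List.mem_of_mem_take (heq ▸ h1)
        exact absurd hpc (by simp [hpre c hcf])
      · exact absurd hpc (by simp [hsuf c h2])
    have hcast : ((e : Int)) + 1 = ((e + 1 : Nat) : Int) := by omega
    rw [hcast, PySem.List.slice_natCast, PySem.List.slice_to_natCast]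
    congr 1
    -- filter of the middle slice = filter of the whole list
    have hsplit1 : cs.filter p = (cs.drop f).filter p := by
      conv_lhs => rw [← List.take_append_drop f cs]
      rw [List.filter_append, List.filter_eq_nil_iff.mpr (by
        intro a ha; simpa using hpre a ha)]
      simp
    have hsplit2 : (cs.drop f).filter p
        = ((cs.drop f).take (e + 1 - f)).filter p := by
      have hdd : (cs.drop f).drop (e + 1 - f) = cs.drop (e + 1) := by
        rw [List.drop_drop]
        congr 1
        omega
      have hnil2 : ((cs.drop f).drop (e + 1 - f)).filter p = [] := by
        rw [hdd, List.filter_eq_nil_iff]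
        intro a ha; simpa using hsuf a ha
      conv_lhs => rw [← List.take_append_drop (e + 1 - f) (cs.drop f)]
      rw [List.filter_append, hnil2, List.append_nil]
    rw [hsplit1, hsplit2]

-- B's loop once a digit has been seen: only digits accumulate
theorem loopB_seen (cs : List Char) (p d : List Char) :
    pvLoopB cs p d true = (p, d ++ cs.filter PySem.Chars.isdigit, true) := by
  induction cs generalizing d with
  | nil => simp [pvLoopB]
  | cons c rest ih =>
    by_cases hc : PySem.Chars.isdigit c
    · simp [pvLoopB, hc, ih, List.filter_cons]
    · simp [pvLoopB, hc, ih, List.filter_cons]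

-- B's loop before any digit, when no digit exists
theorem loopB_none (cs : List Char) (p d : List Char)
    (h : ∀ c ∈ cs, PySem.Chars.isdigit c = false) :
    pvLoopB cs p d false = (p ++ cs, d, false) := by
  induction cs generalizing p with
  | nil => simp [pvLoopB]
  | cons c rest ih =>
    have hc := h c (List.mem_cons_self ..)
    simp [pvLoopB, hc, ih (p ++ [c]) (fun x hx => h x (List.mem_cons_of_mem _ hx))]

-- B's loop before any digit, when a digit exists
theorem loopB_ex (cs : List Char) (p d : List Char)
    (h : ∃ c ∈ cs, PySem.Chars.isdigit c) :
    pvLoopB cs p d false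
      = (p ++ cs.take (cs.findIdx PySem.Chars.isdigit),
         d ++ cs.filter PySem.Chars.isdigit, true) := by
  induction cs generalizing p with
  | nil => simp at h
  | cons c rest ih =>
    by_cases hc : PySem.Chars.isdigit c
    · simp [pvLoopB, hc, loopB_seen, List.findIdx_cons, List.filter_cons]
    · have hr : ∃ x ∈ rest, PySem.Chars.isdigit x := by
        rcases h with ⟨x, hx, hxx⟩
        rcases List.mem_cons.mp hx with rfl | hx
        · exact absurd hxx hc
        · exact ⟨x, hx, hxx⟩
      simp [pvLoopB, hc, ih (p ++ [c]) hr, List.findIdx_cons, List.filter_cons]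

-- B's result equals the same canonical form
theorem b_core_eq (cs : List Char) :
    (let st := pvLoopB cs [] [] false
     if st.2.2 then st.1 ++ st.2.1 else ([] : List Char))
    = (let digits := cs.filter PySem.Chars.isdigit
       if digits.isEmpty then ([] : List Char)
       else cs.take (cs.findIdx PySem.Chars.isdigit) ++ digits) := by
  simp only
  by_cases hE : (cs.filter PySem.Chars.isdigit).isEmpty
  · have hnone : ∀ c ∈ cs, PySem.Chars.isdigit c = false := by
      intro c hc
      have h' := List.isEmpty_iff.mp hE
      rw [List.filter_eq_nil_iff] at h'
      simpa using h' c hc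
    rw [loopB_none cs [] [] hnone]
    simp [hE]
  · have hex : ∃ c ∈ cs, PySem.Chars.isdigit c := by
      have h' : cs.filter PySem.Chars.isdigit ≠ [] := by
        intro h0; exact hE (by simp [h0])
      rcases List.exists_mem_of_ne_nil _ h' with ⟨c, hc⟩
      rw [List.mem_filter] at hc
      exact ⟨c, hc.1, hc.2⟩
    rw [loopB_ex cs [] [] hex]
    simp [hE]

-- ===== VERDICT (by name: the statement is the Claim_ definition above) =====
theorem slice_by_digits_spec : Claim_equal_slice_by_digits := by
  intro email _
  unfold Spec_slice_by_digits slice_by_digits slice_by_digits_alt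
  have hA := a_core_eq email.toList
  have hB := b_core_eq email.toList
  simp only at hA hB ⊢
  rw [hA]
  by_cases hd : (pvLoopB email.toList [] [] false).2.2
  · simp only [hd, if_true] at hB ⊢
    rw [← hB]
  · simp only [hd, if_false, Bool.false_eq_true] at hB ⊢
    rw [← hB]
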